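-- pv_equiv track=rewrite | github.com/patryk-rybak/University | Artificial-Intelligence/p1/ex5.py | is_row_ok
-- ===== SOURCE A (Python) =====
-- def is_row_ok(row_index, rows, img): # ok
--     row = img[row_index]
--     counter = 0
--     for i in row:
--         if i == '#': counter += 1
--     if counter != rows[row_index]: return False
--     if counter == 0 and rows[row_index] == 0: return True
--     for i in range(row.index('#'), row.index('#') + rows[row_index]):
--         if row[i] != '#': return False
--     return True
-- ===== SOURCE B (Python) =====
-- def is_row_ok(row_index, rows, img):
--     row = img[row_index]
--     count = rows[row_index]
--     if row.count('#') != count: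
--         return False
--     if count == 0:
--         return True
--     first = row.index('#')
--     last = len(row) - 1 - row[::-1].index('#')
--     return last - first + 1 == count
-- ===== Notes on version B (the rewrite author's own statement) =====
-- stated objective: simpler
-- what changed: B replaces A's per-cell scan over the block (looping from row.index('#') over count positions) by boundary arithmetic: contiguity holds iff last-'#' index minus first-'#' index plus 1 equals the '#' count.
import Mathlib
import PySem

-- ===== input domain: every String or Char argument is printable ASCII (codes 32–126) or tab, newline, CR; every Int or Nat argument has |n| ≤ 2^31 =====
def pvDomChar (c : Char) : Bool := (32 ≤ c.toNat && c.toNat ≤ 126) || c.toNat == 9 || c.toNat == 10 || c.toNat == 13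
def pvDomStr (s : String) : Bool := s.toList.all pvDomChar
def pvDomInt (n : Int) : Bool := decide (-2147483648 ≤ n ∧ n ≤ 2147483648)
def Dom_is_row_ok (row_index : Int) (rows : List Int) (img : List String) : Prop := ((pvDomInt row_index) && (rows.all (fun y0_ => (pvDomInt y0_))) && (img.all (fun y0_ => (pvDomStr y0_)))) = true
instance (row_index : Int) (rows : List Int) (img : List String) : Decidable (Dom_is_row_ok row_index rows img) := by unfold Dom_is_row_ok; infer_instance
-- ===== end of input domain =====

-- B checks contiguity of the '#' block by span arithmetic (last - first + 1 == count) instead of A's per-cell loop over the block; objective: simpler.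

-- ===== PORT A =====
-- A's body after 'row = img[row_index]' and the 'rows[row_index]' lookup, step for step.
-- str.index('#') of a single character is the first index of that character: PySem.List.index? on the char list (exact; none = ValueError, unreachable here because the preceding guards force count('#') = rows[row_index] ≠ 0).
def isRowOkCoreA (cs : List Char) (r : Int) : Bool :=
  let counter : Int := cs.foldl (fun c i => if i == '#' then c + 1 else c) 0
  if counter ≠ r then false
  else if counter = 0 ∧ r = 0 then true
  else
    match PySem.List.index? cs '#' with
    | none => false
    | some first =>
      (PySem.List.pyRange (first : Int) ((first : Int) + r) 1).all
        (fun i => PySem.List.pyGet? cs i == some '#')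

def is_row_ok (row_index : Int) (rows : List Int) (img : List String) : Bool :=
  match PySem.List.pyGet? img row_index, PySem.List.pyGet? rows row_index with
  | some row, some r => isRowOkCoreA row.toList r
  | _, _ => false   -- IndexError, excluded by Pre_

-- ===== PORT B =====
-- Source B: count via row.count('#'); contiguity via last - first + 1 == count; row[::-1] is reverse (PySem.List.slice?_none_none_neg_one).
def isRowOkCoreB (cs : List Char) (count : Int) : Bool :=
  if (PySem.List.count cs '#' : Int) ≠ count then false
  else if count = 0 then true
  else
    (((PySem.List.index? cs '#').bind (fun first =>
      (PySem.List.index? cs.reverse '#').map (fun rev =>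
        let last : Int := (cs.length : Int) - 1 - (rev : Int)
        decide (last - (first : Int) + 1 = count))))).getD false   -- ValueError, unreachable: count ≠ 0 forces '#' ∈ cs

def is_row_ok_alt (row_index : Int) (rows : List Int) (img : List String) : Bool :=
  (((PySem.List.pyGet? img row_index).bind (fun row =>
    (PySem.List.pyGet? rows row_index).map (fun count =>
      isRowOkCoreB row.toList count)))).getD false   -- none = IndexError, excluded by Pre_

-- ===== PRECONDITION & SPEC =====
-- A raises IndexError exactly when row_index is out of range for img or for rows; nothing else (the inner index('#') and row[i] accesses are guarded).
def Pre_is_row_ok (row_index : Int) (rows : List Int) (img : List String) : Prop :=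
  PySem.Raise.InRange img.length row_index ∧ PySem.Raise.InRange rows.length row_index
instance (row_index : Int) (rows : List Int) (img : List String) : Decidable (Pre_is_row_ok row_index rows img) := by unfold Pre_is_row_ok; infer_instance

def pvWitness_is_row_ok : Int × List Int × List String := (1, [0, 2, 1], [".", ".##", "#.#"])

def Spec_is_row_ok (row_index : Int) (rows : List Int) (img : List String) (out : Bool) : Prop := out = is_row_ok_alt row_index rows img
instance (row_index : Int) (rows : List Int) (img : List String) (out : Bool) : Decidable (Spec_is_row_ok row_index rows img out) := by unfold Spec_is_row_ok; infer_instance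

-- ===== CLAIM (what is proved, stated in full; the proofs are below) =====
def Claim_equal_is_row_ok : Prop := ∀ (row_index : Int) (rows : List Int) (img : List String), Dom_is_row_ok row_index rows img → Pre_is_row_ok row_index rows img → Spec_is_row_ok row_index rows img (is_row_ok row_index rows img)

-- ===== LEMMAS AND PROOFS =====
theorem window_ge_count {cs : List Char} (h : '#' ∈ cs) :
    cs.idxOf '#' + cs.count '#' + cs.reverse.idxOf '#' ≤ cs.length := by
  induction cs with
  | nil => simp at h
  | cons x t ih =>
    by_cases hx : x = '#'
    · subst hx
      rw [List.idxOf_cons_self]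
      simp only [List.reverse_cons, List.count_cons_self, List.length_cons]
      by_cases hm : '#' ∈ t
      · rw [List.idxOf_append_of_mem (by simpa using hm)]
        have := ih hm
        have : t.idxOf '#' + t.count '#' + t.reverse.idxOf '#' ≤ t.length := ih hm
        have h2 : t.reverse.idxOf '#' ≤ t.reverse.length := List.idxOf_le_length
        omega
      · rw [List.idxOf_append_of_notMem (by simpa using hm)]
        have hc : t.count '#' = 0 := List.count_eq_zero.mpr hm
        simp [hc]; omega
    · rcases List.mem_cons.mp h with h0 | hm
      · exact absurd h0.symm hx
      · rw [List.idxOf_cons_ne _ (by simpa using hx)]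
        simp only [List.reverse_cons, List.count_cons, List.length_cons]
        rw [List.idxOf_append_of_mem (by simpa using hm)]
        have := ih hm
        simp [beq_false_of_ne (by simpa using hx : x ≠ '#')]
        omega

theorem main_core (cs : List Char) (h : 0 < cs.count '#') :
    ((List.range (cs.count '#')).all (fun k => cs[cs.idxOf '#' + k]? == some '#'))
    = decide (cs.length - 1 - cs.reverse.idxOf '#' + 1 = cs.idxOf '#' + cs.count '#') := by
  induction cs with
  | nil => simp at h
  | cons x t ih =>
    by_cases hx : x = '#'
    · subst hx
      rw [List.idxOf_cons_self]
      by_cases hm : '#' ∈ t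
      · have hct : 0 < t.count '#' := List.count_pos_iff.mpr hm
        have hrv : t.reverse.idxOf '#' < t.length := by
          have := List.idxOf_lt_length_of_mem (by simpa using hm : '#' ∈ t.reverse)
          simpa using this
        simp only [List.count_cons_self, List.reverse_cons, List.length_cons]
        rw [List.idxOf_append_of_mem (by simpa using hm)]
        by_cases ht0 : t.idxOf '#' = 0
        · have ih' := ih hct
          rw [ht0] at ih'
          rw [List.range_succ_eq_map]
          simp only [List.all_cons, List.all_map, Function.comp_def]
          have : ∀ k : Nat, ('#' :: t)[0 + (k + 1)]? = t[0 + k]? := by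
            intro k; simp
          simp only [this]
          rw [ih']
          have h1 : (('#' :: t)[(0:Nat) + 0]? == some '#') = true := by simp
          rw [h1, Bool.true_and]
          rcases Nat.eq_or_lt_of_le hct with _ | _
          all_goals (apply (Bool.decide_congr ?_); omega)
        · -- t starts with a non-'#': A's scan fails at k = 1, and the span is too wide
          rcases t with _ | ⟨y, t'⟩
          · simp at hm
          · have hy : y ≠ '#' := by
              intro he; subst he; simp [List.idxOf_cons_self] at ht0
            have hW := window_ge_count hm
            have hid : 0 < (y :: t').idxOf '#' := Nat.pos_of_ne_zero ht0
            have lhs_false : ((List.range ((y :: t').count '#' + 1)).all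
                (fun k => ('#' :: y :: t')[0 + k]? == some '#')) = false := by
              apply List.all_eq_false.mpr
              refine ⟨1, ?_, ?_⟩
              · rw [List.mem_range]
                omega
              · simp [hy]
            rw [lhs_false]
            symm
            rw [decide_eq_false_iff_not]
            omega
      · -- count t = 0, c = 1
        have hc : t.count '#' = 0 := List.count_eq_zero.mpr hm
        simp only [List.count_cons_self, hc, List.reverse_cons, List.length_cons]
        rw [List.idxOf_append_of_notMem (by simpa using hm)]
        simp
    · have hne : x ≠ '#' := hx
      have hct : 0 < t.count '#' := by
        simpa [List.count_cons, beq_false_of_ne hne] using h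
      have hm : '#' ∈ t := List.count_pos_iff.mp hct
      rw [List.idxOf_cons_ne _ (by simpa using hne)]
      simp only [List.count_cons, beq_false_of_ne hne, List.reverse_cons, List.length_cons]
      rw [List.idxOf_append_of_mem (by simpa using hm)]
      have hrv : t.reverse.idxOf '#' < t.length := by
        have := List.idxOf_lt_length_of_mem (by simpa using hm : '#' ∈ t.reverse)
        simpa using this
      have lhs_eq : ∀ k, (x :: t)[t.idxOf '#' + 1 + k]? = t[t.idxOf '#' + k]? := by
        intro k
        have : t.idxOf '#' + 1 + k = (t.idxOf '#' + k) + 1 := by omega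
        rw [this]
        simp
      simp only [lhs_eq, if_neg (by decide : ¬ (false = true)), Nat.add_zero, Nat.succ_eq_add_one]
      rw [ih hct]
      apply Bool.decide_congr
      omega

theorem index?_some_of_mem {cs : List Char} {v : Char} (h : v ∈ cs) :
    PySem.List.index? cs v = some (cs.idxOf v) := by
  rw [PySem.List.index?_eq_idxOf?]
  have hs : (cs.idxOf? v).isSome := by simpa [List.isSome_idxOf?] using h
  obtain ⟨k, hk⟩ := Option.isSome_iff_exists.mp hs
  rw [hk]
  have := List.idxOf_eq_getD_idxOf? (a := v) (l := cs)
  rw [hk] at this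
  simp at this
  rw [this]

theorem core_eq (cs : List Char) (r : Int) : isRowOkCoreA cs r = isRowOkCoreB cs r := by
  unfold isRowOkCoreA isRowOkCoreB
  rw [PySem.List.foldl_beq_add_one]
  rw [PySem.List.count_eq]
  simp only [Int.zero_add]
  by_cases hr : (cs.count '#' : Int) ≠ r
  · simp [hr]
  · rw [not_not] at hr
    subst hr
    simp only [ne_eq, not_true_eq_false, if_false]
    by_cases h0 : cs.count '#' = 0
    · simp [h0]
    · have hpos : 0 < cs.count '#' := Nat.pos_of_ne_zero h0
      have hm : '#' ∈ cs := List.count_pos_iff.mp hpos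
      have hmr : '#' ∈ cs.reverse := by simpa using hm
      have hc0 : ¬ ((cs.count '#' : Int) = 0 ∧ (cs.count '#' : Int) = 0) := by
        intro h'; exact h0 (by exact_mod_cast h'.1)
      rw [if_neg hc0, if_neg (by exact_mod_cast h0)]
      rw [index?_some_of_mem hm, index?_some_of_mem hmr]
      dsimp only
      have hrv : cs.reverse.idxOf '#' < cs.length := by
        have := List.idxOf_lt_length_of_mem hmr
        simpa using this
      -- A's range-all to Nat form
      rw [PySem.List.pyRange_one]
      have harg : ((cs.idxOf '#' : Int) + (cs.count '#' : Int) - (cs.idxOf '#' : Int)).toNat = cs.count '#' := by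
        omega
      rw [harg, List.all_map]
      have hfun : ∀ k : Nat,
          ((fun i => PySem.List.pyGet? cs i == some '#') ∘ (fun k : Nat => (cs.idxOf '#' : Int) + k)) k
          = (cs[cs.idxOf '#' + k]? == some '#') := by
        intro k
        simp only [Function.comp_apply]
        have : (cs.idxOf '#' : Int) + (k : Int) = ((cs.idxOf '#' + k : Nat) : Int) := by push_cast; ring
        rw [this, PySem.List.pyGet?_natCast]
      rw [List.all_congr rfl hfun]
      rw [main_core cs hpos]
      apply Bool.decide_congr
      omega

-- ===== VERDICT (by name: the statement is the Claim_ definition above) =====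
theorem is_row_ok_spec : Claim_equal_is_row_ok := by
  intro ri rows img _ hpre
  unfold Pre_is_row_ok at hpre
  obtain ⟨h1, h2⟩ := hpre
  unfold Spec_is_row_ok is_row_ok is_row_ok_alt
  have e1 : PySem.List.pyGet? img ri ≠ none := by
    rw [ne_eq, PySem.List.pyGet?_eq_none_iff]
    simpa using h1
  have e2 : PySem.List.pyGet? rows ri ≠ none := by
    rw [ne_eq, PySem.List.pyGet?_eq_none_iff]
    simpa using h2
  obtain ⟨row, hrow⟩ := Option.ne_none_iff_exists'.mp e1
  obtain ⟨r, hr⟩ := Option.ne_none_iff_exists'.mp e2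
  rw [hrow, hr]
  exact core_eq row.toList r
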